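-- pv_equiv track=rewrite | github.com/ZJUFanLab/MSformer | msformer/masskg.py | get_bridge_bonds
-- ===== SOURCE A (Python) =====
-- def get_bridge_bonds(bonds_in_r):
--     bb = []
--     for i in range(len(bonds_in_r)):
--         bs1 = bonds_in_r[i]
--         bs2 = [b for j in range(len(bonds_in_r)) if i!=j for b in bonds_in_r[j]]
--         for b in bs1:
--             if b in bs2:
--                 bb.append(b)
--     bb = set(bb)
--     return bb
-- ===== SOURCE B (Python) =====
-- def get_bridge_bonds(bonds_in_r):
--     counts = {}
--     for group in bonds_in_r:
--         for b in dict.fromkeys(group):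
--             counts[b] = counts.get(b, 0) + 1
--     return {b for b, c in counts.items() if c >= 2}
-- ===== Notes on version B (the rewrite author's own statement) =====
-- stated objective: faster
-- what changed: Replaces A's nested rescan (for each group, rebuild the concatenation of all other groups and test membership in it) with a single pass that counts, per bond, how many distinct groups contain it, then returns the bonds with count >= 2.
import Mathlib
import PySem

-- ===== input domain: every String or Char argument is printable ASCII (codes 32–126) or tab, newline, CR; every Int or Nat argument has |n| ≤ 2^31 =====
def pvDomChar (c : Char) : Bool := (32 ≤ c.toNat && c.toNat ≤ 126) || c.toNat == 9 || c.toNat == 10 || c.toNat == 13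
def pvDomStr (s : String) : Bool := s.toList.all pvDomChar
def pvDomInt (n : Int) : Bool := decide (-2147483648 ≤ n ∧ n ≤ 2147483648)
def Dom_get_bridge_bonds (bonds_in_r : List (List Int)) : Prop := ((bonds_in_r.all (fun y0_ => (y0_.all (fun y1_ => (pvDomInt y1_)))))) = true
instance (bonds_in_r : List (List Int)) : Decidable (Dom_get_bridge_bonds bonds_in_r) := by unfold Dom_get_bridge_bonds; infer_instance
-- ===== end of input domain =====

-- B replaces A's nested rescan of all other groups with a single counting pass
-- over the groups; a bond is a bridge iff it occurs in at least two distinct groups.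

-- ===== PORT A =====
def get_bridge_bonds (bonds_in_r : List (List Int)) : List Int :=
  -- bb = []; for i in range(len(bonds_in_r)): ...
  let bb : List Int :=
    (PySem.List.pyRange 0 (PySem.List.len bonds_in_r) 1).foldl (fun bb i =>
      let bs1 := PySem.List.pyGetD bonds_in_r i []
      -- bs2 = [b for j in range(len(bonds_in_r)) if i!=j for b in bonds_in_r[j]]
      let bs2 := ((PySem.List.pyRange 0 (PySem.List.len bonds_in_r) 1).filter
                    (fun j => !(i == j))).flatMap
                  (fun j => PySem.List.pyGetD bonds_in_r j [])
      -- for b in bs1: if b in bs2: bb.append(b)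
      bs1.foldl (fun bb b => if bs2.contains b then bb ++ [b] else bb) bb) []
  -- bb = set(bb); return bb
  PySem.Set.ofList bb

-- ===== PORT B =====
def get_bridge_bonds_alt (bonds_in_r : List (List Int)) : List Int :=
  -- counts = {}; for group in bonds_in_r: for b in dict.fromkeys(group): counts[b] = counts.get(b, 0) + 1
  let counts : PySem.Dict Int Int :=
    bonds_in_r.foldl (fun d group =>
      (PySem.List.dedup group).foldl (fun d b => d.insert b (d.getD b 0 + 1)) d)
      PySem.Dict.empty
  -- return {b for b, c in counts.items() if c >= 2}
  PySem.Set.ofList ((counts.items.filter (fun p => 2 ≤ p.2)).map (·.1))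

-- ===== PRECONDITION & SPEC =====
def Spec_get_bridge_bonds (bonds_in_r : List (List Int)) (out : List Int) : Prop := out = get_bridge_bonds_alt bonds_in_r
instance (bonds_in_r : List (List Int)) (out : List Int) : Decidable (Spec_get_bridge_bonds bonds_in_r out) := by unfold Spec_get_bridge_bonds; infer_instance

-- ===== CLAIM (what is proved, stated in full; the proofs are below) =====
def Claim_equal_get_bridge_bonds : Prop := ∀ (bonds_in_r : List (List Int)), Dom_get_bridge_bonds bonds_in_r → Spec_get_bridge_bonds bonds_in_r (get_bridge_bonds bonds_in_r)

-- ===== LEMMAS AND PROOFS =====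

-- number of groups that contain b
def hitCount (g : List (List Int)) (b : Int) : Nat := g.countP (fun grp => decide (b ∈ grp))

-- (range k).map (g.getD · []) = g.take k   for k ≤ g.length
theorem map_getD_range_take (g : List (List Int)) (k : Nat) (hk : k ≤ g.length) :
    (List.range k).map (fun j => g.getD j []) = g.take k := by
  apply List.ext_getElem
  · simp [Nat.min_eq_left hk]
  · intro i h1 h2
    simp only [List.getElem_map, List.getElem_range, List.getElem_take]
    rw [List.getD_eq_getElem]

-- A's "all other groups" concatenation bs2 is the flatten of g with group k removed
theorem bs2_eq (g : List (List Int)) (k : Nat) (hk : k < g.length) :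
    ((PySem.List.pyRange 0 (PySem.List.len g) 1).filter
        (fun j => !((k : Int) == j))).flatMap (fun j => PySem.List.pyGetD g j []) =
      (g.take k).flatten ++ (g.drop (k + 1)).flatten := by
  have hkn : (k : Int) < (g.length : Int) := by exact_mod_cast hk
  have hsplit : PySem.List.pyRange 0 (PySem.List.len g) 1 =
      PySem.List.pyRange 0 (k : Int) 1 ++ ((k : Int) :: PySem.List.pyRange ((k : Int) + 1) (PySem.List.len g) 1) := by
    rw [← PySem.List.pyRange_one_cons (by rw [PySem.List.len_eq]; exact hkn)]
    exact PySem.List.pyRange_one_append 0 (k : Int) _ (by positivity) (by rw [PySem.List.len_eq]; exact le_of_lt hkn)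
  rw [hsplit, List.filter_append, List.filter_cons_of_neg (by simp)]
  have h1 : (PySem.List.pyRange 0 (k : Int) 1).filter (fun j => !((k : Int) == j)) =
      PySem.List.pyRange 0 (k : Int) 1 := by
    apply List.filter_eq_self.mpr
    intro j hj
    rw [PySem.List.mem_pyRange_one] at hj
    simp; omega
  have h2 : (PySem.List.pyRange ((k : Int) + 1) (PySem.List.len g) 1).filter (fun j => !((k : Int) == j)) =
      PySem.List.pyRange ((k : Int) + 1) (PySem.List.len g) 1 := by
    apply List.filter_eq_self.mpr
    intro j hj
    rw [PySem.List.mem_pyRange_one] at hj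
    simp; omega
  rw [h1, h2, List.flatMap_append]
  congr 1
  · rw [PySem.List.pyRange_zero_nat, List.flatMap_map, List.flatMap_def,
        ← map_getD_range_take g k (le_of_lt hk)]
    congr 1
    apply List.map_congr_left
    intro j hj
    rw [List.mem_range] at hj
    exact PySem.List.pyGetD_natCast g j []
  · rw [List.flatMap_def, PySem.List.map_pyGetD_pyRange g ([] : List Int) (a := (k : Int) + 1) (by positivity)]
    congr 2

-- membership in the other groups ↔ b lies in at least two groups, given b ∈ g[k]
theorem contains_bs2_iff (g : List (List Int)) (k : Nat) (hk : k < g.length) (b : Int)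
    (hb : b ∈ g[k]) :
    (((g.take k).flatten ++ (g.drop (k + 1)).flatten).contains b) = decide (2 ≤ hitCount g b) := by
  have hg : g = g.take k ++ g[k] :: g.drop (k + 1) := by
    conv_lhs => rw [← List.take_append_drop k g]
    rw [List.getElem_cons_drop]
  have hcount : hitCount g b =
      (g.take k).countP (fun grp => decide (b ∈ grp)) + 1 +
        (g.drop (k + 1)).countP (fun grp => decide (b ∈ grp)) := by
    unfold hitCount
    conv_lhs => rw [hg]
    rw [List.countP_append, List.countP_cons, if_pos (by simpa using hb)]
    omega
  rw [Bool.eq_iff_iff, decide_eq_true_iff]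
  simp only [List.contains_eq_mem, decide_eq_true_eq, hcount, List.mem_append, List.mem_flatten]
  constructor
  · rintro (⟨l, hl, hbl⟩ | ⟨l, hl, hbl⟩)
    · have : 0 < (g.take k).countP (fun grp => decide (b ∈ grp)) :=
        List.countP_pos_iff.mpr ⟨l, hl, by simpa using hbl⟩
      omega
    · have : 0 < (g.drop (k + 1)).countP (fun grp => decide (b ∈ grp)) :=
        List.countP_pos_iff.mpr ⟨l, hl, by simpa using hbl⟩
      omega
  · intro h
    by_cases h1 : 0 < (g.take k).countP (fun grp => decide (b ∈ grp))
    · rw [List.countP_pos_iff] at h1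
      obtain ⟨l, hl, hbl⟩ := h1
      exact Or.inl ⟨l, hl, by simpa using hbl⟩
    · have h2 : 0 < (g.drop (k + 1)).countP (fun grp => decide (b ∈ grp)) := by omega
      rw [List.countP_pos_iff] at h2
      obtain ⟨l, hl, hbl⟩ := h2
      exact Or.inr ⟨l, hl, by simpa using hbl⟩

-- A computes set(filter of the concatenation of all groups by "b is in ≥ 2 groups")
theorem a_side (g : List (List Int)) :
    get_bridge_bonds g =
      PySem.Set.ofList (g.flatten.filter (fun b => decide (2 ≤ hitCount g b))) := by
  unfold get_bridge_bonds
  simp only [PySem.List.foldl_append_if]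
  rw [PySem.List.foldl_append_eq_flatMap, List.nil_append]
  congr 1
  rw [PySem.List.len_eq, PySem.List.pyRange_zero_nat, List.flatMap_map, List.flatMap_def,
      List.filter_flatten]
  congr 1
  apply List.ext_getElem
  · simp
  · intro i h1 h2
    simp only [List.getElem_map, List.getElem_range]
    have hi : i < g.length := by simpa using h1
    rw [List.map_id'', PySem.List.pyGetD_natCast, List.getD_eq_getElem g [] hi]
    apply List.filter_congr
    intro b hb
    have hb2 := bs2_eq g i hi
    rw [PySem.List.len_eq, PySem.List.pyRange_zero_nat] at hb2
    rw [hb2, contains_bs2_iff g i hi b hb]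
    exact fun _ => rfl

-- per-group-deduplicated occurrence count = number of groups containing b
theorem count_flatMap_dedup (g : List (List Int)) (b : Int) :
    (g.flatMap PySem.List.dedup).count b = hitCount g b := by
  induction g with
  | nil => rfl
  | cons x g ih =>
    unfold hitCount at *
    rw [List.flatMap_cons, List.count_append, List.countP_cons, ih]
    by_cases hb : b ∈ x
    · rw [List.count_eq_one_of_mem (by rw [PySem.List.dedup_eq_ofList]; exact PySem.Set.nodup_ofList x)
        (by rw [PySem.List.dedup_eq_ofList]; exact (PySem.Set.mem_ofList x b).mpr hb),
        if_pos (by simpa using hb)]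
      omega
    · rw [List.count_eq_zero.mpr (by rw [PySem.List.dedup_eq_ofList]; exact fun h => hb ((PySem.Set.mem_ofList x b).mp h)),
        if_neg (by simpa using hb)]
      omega

theorem update_dedup (s : PySem.Set Int) (x : List Int) :
    s.update (PySem.List.dedup x) = s.update x := by
  rw [PySem.Set.update_eq_append_filter, PySem.Set.update_eq_append_filter,
      PySem.List.dedup_eq_ofList, PySem.Set.ofList_ofList]

theorem update_flatMap_dedup (g : List (List Int)) (s : PySem.Set Int) :
    s.update (g.flatMap PySem.List.dedup) = s.update g.flatten := by
  induction g generalizing s with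
  | nil => rfl
  | cons x g ih =>
    rw [List.flatMap_cons, List.flatten_cons, PySem.Set.update_append, PySem.Set.update_append,
        update_dedup, ih]

theorem ofList_flatMap_dedup (g : List (List Int)) :
    PySem.Set.ofList (g.flatMap PySem.List.dedup) = PySem.Set.ofList g.flatten := by
  have h1 := update_flatMap_dedup g []
  simpa [PySem.Set.update_empty] using h1

-- set() commutes with filter (keeping first-occurrence order)
theorem ofList_filter (xs : List Int) (p : Int → Bool) :
    PySem.Set.ofList (xs.filter p) = (PySem.Set.ofList xs).filter p := by
  induction xs with
  | nil => rfl
  | cons x xs ih =>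
    by_cases hp : p x
    · rw [List.filter_cons_of_pos hp, PySem.Set.ofList_cons, PySem.Set.ofList_cons, ih,
          List.filter_cons_of_pos hp]
      congr 1
      show ((PySem.Set.ofList xs).filter p).filter (fun y => !y == x) =
        ((PySem.Set.ofList xs).filter (fun y => !y == x)).filter p
      rw [List.filter_filter, List.filter_filter]
      apply List.filter_congr
      intro b _
      rw [Bool.and_comm]
    · rw [List.filter_cons_of_neg (by simp [hp]), PySem.Set.ofList_cons,
          List.filter_cons_of_neg (by simp [hp]), ih]
      show _ = ((PySem.Set.ofList xs).filter (fun y => !y == x)).filter p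
      rw [List.filter_filter]
      apply List.filter_congr
      intro b _
      by_cases hpb : p b
      · have hne : b ≠ x := fun h => hp (h ▸ hpb)
        simp [hpb, hne]
      · simp [hpb]

-- B computes set(filter of set(concatenation of deduplicated groups) by the same predicate)
theorem b_side (g : List (List Int)) :
    get_bridge_bonds_alt g =
      PySem.Set.ofList ((PySem.Set.ofList (g.flatMap PySem.List.dedup)).filter
        (fun b => decide (2 ≤ (g.flatMap PySem.List.dedup).count b))) := by
  show PySem.Set.ofList _ = _
  rw [← List.foldl_flatMap, PySem.Dict.foldl_insert_getD_add_one_eq_counter,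
      PySem.Dict.items_counter, List.filter_map, List.map_map]
  congr 1
  have hmap : ((PySem.Set.ofList (g.flatMap PySem.List.dedup)).filter
      ((fun (p : Int × Int) => decide (2 ≤ p.2)) ∘ fun k => (k, ((g.flatMap PySem.List.dedup).count k : Int)))).map
        ((fun (p : Int × Int) => p.1) ∘ fun k => (k, ((g.flatMap PySem.List.dedup).count k : Int))) =
      ((PySem.Set.ofList (g.flatMap PySem.List.dedup)).filter
      ((fun (p : Int × Int) => decide (2 ≤ p.2)) ∘ fun k => (k, ((g.flatMap PySem.List.dedup).count k : Int)))).map id := by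
    apply List.map_congr_left; intro x _; rfl
  rw [hmap, List.map_id]
  apply List.filter_congr
  intro b _
  simp only [Function.comp_apply, decide_eq_decide]
  exact_mod_cast Iff.rfl

theorem main_eq (g : List (List Int)) : get_bridge_bonds g = get_bridge_bonds_alt g := by
  rw [a_side, b_side, ofList_filter]
  have hpred : (fun b => decide (2 ≤ (g.flatMap PySem.List.dedup).count b)) =
      (fun b => decide (2 ≤ hitCount g b)) := by
    funext b
    rw [count_flatMap_dedup]
  rw [hpred, ofList_flatMap_dedup]
  exact (PySem.Set.ofList_eq_self_of_nodup _ ((PySem.Set.nodup_ofList g.flatten).filter _)).symm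

-- ===== VERDICT (by name: the statement is the Claim_ definition above) =====
theorem get_bridge_bonds_spec : Claim_equal_get_bridge_bonds := by
  intro g _
  unfold Spec_get_bridge_bonds
  exact main_eq g
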